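-- pv_equiv track=rewrite | github.com/alderney2023/Algorithm_Foundations | 12.BFR_and_DP/Code13_BRF_DP_BobDie.py | process
-- ===== SOURCE A (Python) =====
-- def process(M, N, x, y, rest):  # x,y 为当前位置，rest为还有多少步要走
--     if x<0 or x>=M or y<0 or y>=N:
--         return 0
--     if rest == 0:
--         return 1
--
--     return process(M, N, x+1, y+1, rest-1) + \
--             process(M, N, x+1, y-1, rest-1) + \
--             process(M, N, x-1, y+1, rest-1) + \
--             process(M, N, x-1, y-1, rest-1)
-- ===== SOURCE B (Python) =====
-- def _count1d(L, p, rest):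
--     # number of +-1 walks of `rest` steps from p staying inside [0, L)
--     if p < 0 or p >= L:
--         return 0
--     n = max(rest, 0)  # clamp the step count: a negative number of steps means no steps
--     lo = max(0, p - n)
--     hi = min(L - 1, p + n)
--     cur = [1] * (hi - lo + 1)  # cells beyond the window are unreachable in n steps
--     for _ in range(n):
--         if not any(cur):
--             break  # every cell is dead; further steps keep the window all-zero
--         cur = [(cur[i - 1] if i > 0 else 0) + (cur[i + 1] if i + 1 < len(cur) else 0)
--                for i in range(len(cur))]
--     return cur[p - lo]
--
-- def process(M, N, x, y, rest):
--     if x < 0 or x >= M or y < 0 or y >= N: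
--         return 0
--     # the x- and y-coordinates move independently (+-1 each step), so the 2-D survival
--     # count is the product of two 1-D counts; do the narrower dimension first and
--     # short-circuit on 0 so a dead narrow dimension skips the wide one
--     if M <= N:
--         c = _count1d(M, x, rest)
--         return 0 if c == 0 else c * _count1d(N, y, rest)
--     else:
--         c = _count1d(N, y, rest)
--         return 0 if c == 0 else c * _count1d(M, x, rest)
-- ===== Notes on version B (the rewrite author's own statement) =====
-- stated objective: alternative
-- what changed: Uses that the x- and y-coordinates move independently: the answer is the product of two 1-D boundary-respecting +-1 walk counts, each computed by a bottom-up DP over a window of at most min(L, 2*rest+1) cells with an all-dead early exit, instead of A's 4-way recursion over the 2-D board.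
-- outside the precondition, e.g. on process(1, 1, 0, 0, -1): A returns 0, B returns 1; on process(2, 2, 0, 0, -1): A raises RecursionError, B returns 1; on process(2, 2, 0, 0, 99999): A raises RecursionError, B returns 1
import Mathlib
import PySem

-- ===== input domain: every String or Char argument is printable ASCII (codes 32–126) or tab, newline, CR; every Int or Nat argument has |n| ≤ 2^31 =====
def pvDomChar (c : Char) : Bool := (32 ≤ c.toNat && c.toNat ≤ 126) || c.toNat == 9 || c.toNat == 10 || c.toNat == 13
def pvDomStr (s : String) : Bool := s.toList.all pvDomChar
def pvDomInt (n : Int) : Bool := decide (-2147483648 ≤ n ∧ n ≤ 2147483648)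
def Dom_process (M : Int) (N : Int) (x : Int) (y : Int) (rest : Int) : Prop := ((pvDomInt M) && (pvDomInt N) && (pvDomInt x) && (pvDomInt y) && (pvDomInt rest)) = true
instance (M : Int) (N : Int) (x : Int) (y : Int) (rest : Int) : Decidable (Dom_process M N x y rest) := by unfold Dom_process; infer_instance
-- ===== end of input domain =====

-- B replaces A's 4-way recursion over the 2-D board by the product of two windowed 1-D DP walk counts (a different algorithm of the same proved value).


-- ===== PORT A =====
-- A's recursion, with rest as fuel (on Pre_, rest ≥ 0 whenever the recursive branch is reached, so this is exact);
-- at every call: the bounds check first, then the rest == 0 test, then the four recursive calls.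
def processA (M : Int) (N : Int) : Nat → Int → Int → Int
  | 0, x, y => if x < 0 ∨ M ≤ x ∨ y < 0 ∨ N ≤ y then 0 else 1
  | Nat.succ r', x, y =>
    if x < 0 ∨ M ≤ x ∨ y < 0 ∨ N ≤ y then 0
    else
      processA M N r' (x+1) (y+1) + processA M N r' (x+1) (y-1) +
      processA M N r' (x-1) (y+1) + processA M N r' (x-1) (y-1)

def process (M : Int) (N : Int) (x : Int) (y : Int) (rest : Int) : Int :=
  processA M N rest.toNat x y

-- ===== PORT B =====
-- one loop iteration of _count1d in Source B: the comprehension over range(len(cur))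
def count1dStep (w : List Int) : List Int :=
  (List.range w.length).map fun (i : Nat) =>
    (if 0 < i then w.getD (i - 1) 0 else 0) + (if i + 1 < w.length then w.getD (i + 1) 0 else 0)

-- the loop of _count1d with its early exit: `if not any(cur): break`
def count1dLoop : Nat → List Int → List Int
  | 0, w => w
  | Nat.succ t, w => if w.all (fun v => v == 0) then w else count1dLoop t (count1dStep w)

-- _count1d in Source B: windowed 1-D DP for the number of ±1 walks staying inside [0, L)
def count1d (L : Int) (p : Int) (rest : Int) : Int :=
  if p < 0 ∨ L ≤ p then 0
  else
    let n : Int := max rest 0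
    let lo : Int := max 0 (p - n)
    let hi : Int := min (L - 1) (p + n)
    (count1dLoop n.toNat (List.replicate (hi - lo + 1).toNat 1)).getD (p - lo).toNat 0

def process_alt (M : Int) (N : Int) (x : Int) (y : Int) (rest : Int) : Int :=
  if x < 0 ∨ M ≤ x ∨ y < 0 ∨ N ≤ y then 0
  else if M ≤ N then
    let c := count1d M x rest
    if c = 0 then 0 else c * count1d N y rest
  else
    let c := count1d N y rest
    if c = 0 then 0 else c * count1d M x rest

-- ===== PRECONDITION & SPEC =====
-- Pre_ excludes only inputs on which Python A cannot return an ordinary in-domain value: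
-- (a) negative rest with an in-bounds start, outside the task's natural domain — there A recurses with
-- no base case, raising RecursionError on boards with both sides ≥ 2, and on width-≤1 boards returning
-- a 0 produced by that leftover recursion, while B counts a negative number of steps as zero steps; and
-- (b) in-bounds starts on boards with both sides ≥ 2 with rest ≥ 9900, where the recursion of depth rest
-- reaches the interpreter's recursion limit and A raises RecursionError; the exact raising frame is
-- interpreter-dependent, so a thin band where A still returns (feasible only on 2×2 boards) is excluded with it.
def Pre_process (M : Int) (N : Int) (x : Int) (y : Int) (rest : Int) : Prop :=
  (0 ≤ rest ∧ (rest < 9900 ∨ M ≤ 1 ∨ N ≤ 1)) ∨ x < 0 ∨ M ≤ x ∨ y < 0 ∨ N ≤ y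
instance (M : Int) (N : Int) (x : Int) (y : Int) (rest : Int) : Decidable (Pre_process M N x y rest) := by unfold Pre_process; infer_instance

def pvWitness_process : Int × Int × Int × Int × Int := (3, 3, 1, 1, 2)

def Spec_process (M : Int) (N : Int) (x : Int) (y : Int) (rest : Int) (out : Int) : Prop := out = process_alt M N x y rest
instance (M : Int) (N : Int) (x : Int) (y : Int) (rest : Int) (out : Int) : Decidable (Spec_process M N x y rest out) := by unfold Spec_process; infer_instance

-- ===== CLAIM (what is proved, stated in full; the proofs are below) =====
def Claim_equal_process : Prop := ∀ (M : Int) (N : Int) (x : Int) (y : Int) (rest : Int), Dom_process M N x y rest → Pre_process M N x y rest → Spec_process M N x y rest (process M N x y rest)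

-- ===== LEMMAS AND PROOFS =====

-- the unwindowed 1-D walk count (proof-only reference function)
def gWalk (L : Int) : Nat → Int → Int
  | 0, p => if p < 0 ∨ L ≤ p then 0 else 1
  | Nat.succ r', p =>
    if p < 0 ∨ L ≤ p then 0
    else gWalk L r' (p+1) + gWalk L r' (p-1)

theorem gWalk_oob (L : Int) (r : Nat) (p : Int) (h : p < 0 ∨ L ≤ p) : gWalk L r p = 0 := by
  cases r <;> simp only [gWalk, if_pos h]

-- A's 2-D count factorizes into the two independent 1-D counts
theorem processA_factor (M N : Int) (r : Nat) (x y : Int) :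
    processA M N r x y = gWalk M r x * gWalk N r y := by
  induction r generalizing x y with
  | zero =>
    simp only [processA, gWalk]
    by_cases hx : x < 0 ∨ M ≤ x
    · rw [if_pos (by tauto), if_pos hx, zero_mul]
    · by_cases hy : y < 0 ∨ N ≤ y
      · rw [if_pos (by tauto), if_neg hx, if_pos hy, mul_zero]
      · rw [if_neg (by tauto), if_neg hx, if_neg hy, one_mul]
  | succ r' ih =>
    simp only [processA, gWalk]
    by_cases hx : x < 0 ∨ M ≤ x
    · rw [if_pos (by tauto), if_pos hx, zero_mul]
    · by_cases hy : y < 0 ∨ N ≤ y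
      · rw [if_pos (by tauto), if_neg hx, if_pos hy, mul_zero]
      · rw [if_neg (by tauto), if_neg hx, if_neg hy, ih, ih, ih, ih]
        ring

theorem getD_map_range {α : Type} (n : Nat) (f : Nat → α) (k : Nat) (d : α) :
    ((List.range n).map f).getD k d = if k < n then f k else d := by
  by_cases h : k < n
  · rw [List.getD_eq_getElem _ _ (by simpa using h), if_pos h]
    simp
  · rw [List.getD_eq_default _ _ (by simpa using h), if_neg h]

theorem getD_replicate {α : Type} (n : Nat) (a : α) (k : Nat) (d : α) :
    (List.replicate n a).getD k d = if k < n then a else d := by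
  by_cases h : k < n
  · rw [List.getD_eq_getElem _ _ (by simpa using h), if_pos h]
    simp
  · rw [List.getD_eq_default _ _ (by simpa using h), if_neg h]

theorem count1dStep_length (w : List Int) : (count1dStep w).length = w.length := by
  simp [count1dStep]

theorem count1dStep_getD (w : List Int) (k : Nat) (hk : k < w.length) :
    (count1dStep w).getD k 0 =
      (if 0 < k then w.getD (k - 1) 0 else 0) + (if k + 1 < w.length then w.getD (k + 1) 0 else 0) := by
  unfold count1dStep
  rw [getD_map_range, if_pos hk]

theorem iterate_length (t : Nat) (w : List Int) :
    (count1dStep^[t] w).length = w.length := by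
  induction t with
  | zero => rfl
  | succ t' ih => rw [Function.iterate_succ_apply', count1dStep_length, ih]

-- window correctness: within the dependence cone the windowed DP agrees with gWalk
theorem window_correct (L p : Int) (r : Nat) (hp : ¬ (p < 0 ∨ L ≤ p)) (t : Nat) (ht : t ≤ r)
    (q : Int) (hlo : max 0 (p - (r : Int)) ≤ q) (hhi : q ≤ min (L - 1) (p + (r : Int)))
    (hcone : (p - q).natAbs ≤ r - t) :
    (count1dStep^[t] (List.replicate (min (L - 1) (p + (r : Int)) - max 0 (p - (r : Int)) + 1).toNat 1)).getD
        (q - max 0 (p - (r : Int))).toNat 0 = gWalk L t q := by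
  induction t generalizing q with
  | zero =>
    simp only [Function.iterate_zero, id_eq]
    rw [getD_replicate, if_pos (by omega)]
    rw [gWalk, if_neg (by omega)]
  | succ t' ih =>
    rw [Function.iterate_succ_apply']
    rw [count1dStep_getD _ _ (by rw [iterate_length, List.length_replicate]; omega)]
    rw [iterate_length, List.length_replicate]
    conv_rhs => rw [gWalk]
    rw [if_neg (show ¬ (q < 0 ∨ L ≤ q) by omega)]
    have hL : gWalk L t' (q - 1) =
        if 0 < (q - max 0 (p - (r : Int))).toNat then
          (count1dStep^[t'] (List.replicate (min (L - 1) (p + (r : Int)) - max 0 (p - (r : Int)) + 1).toNat 1)).getD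
            ((q - max 0 (p - (r : Int))).toNat - 1) 0
        else 0 := by
      by_cases hq : max 0 (p - (r : Int)) ≤ q - 1
      · rw [if_pos (by omega)]
        have := ih (by omega) (q - 1) hq (by omega) (by omega)
        rw [show (q - max 0 (p - (r : Int))).toNat - 1 = (q - 1 - max 0 (p - (r : Int))).toNat by omega]
        rw [this]
      · rw [if_neg (by omega), gWalk_oob]
        omega
    have hR : gWalk L t' (q + 1) =
        if (q - max 0 (p - (r : Int))).toNat + 1 < (min (L - 1) (p + (r : Int)) - max 0 (p - (r : Int)) + 1).toNat then
          (count1dStep^[t'] (List.replicate (min (L - 1) (p + (r : Int)) - max 0 (p - (r : Int)) + 1).toNat 1)).getD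
            ((q - max 0 (p - (r : Int))).toNat + 1) 0
        else 0 := by
      by_cases hq : q + 1 ≤ min (L - 1) (p + (r : Int))
      · rw [if_pos (by omega)]
        have := ih (by omega) (q + 1) (by omega) hq (by omega)
        rw [show (q - max 0 (p - (r : Int))).toNat + 1 = (q + 1 - max 0 (p - (r : Int))).toNat by omega]
        rw [this]
      · rw [if_neg (by omega), gWalk_oob]
        omega
    rw [← hL, ← hR]
    ring

-- a window of dead cells is a fixed point of one DP step
theorem count1dStep_all_zero (w : List Int) (h : w.all (fun v => v == 0) = true) :
    count1dStep w = w := by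
  apply List.ext_getElem
  · simp [count1dStep]
  · intro i h1 h2
    have hz : ∀ k : Nat, w.getD k 0 = 0 := by
      intro k
      by_cases hk : k < w.length
      · rw [List.getD_eq_getElem _ _ hk]
        have := List.all_eq_true.mp h _ (List.getElem_mem hk)
        simpa using this
      · rw [List.getD_eq_default _ _ (by omega)]
    simp only [count1dStep, List.getElem_map, List.getElem_range]
    rw [hz, hz]
    have := hz i
    rw [List.getD_eq_getElem _ _ h2] at this
    rw [this]
    simp

-- a dead window stays fixed under any number of DP steps
theorem iterate_all_zero (w : List Int) (h : w.all (fun v => v == 0) = true) (n : Nat) :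
    count1dStep^[n] w = w := by
  induction n with
  | zero => rfl
  | succ t ih => rw [Function.iterate_succ_apply, count1dStep_all_zero w h, ih]

-- the early-exit loop computes the same window as the plain iteration
theorem count1dLoop_eq_iterate (n : Nat) (w : List Int) :
    count1dLoop n w = count1dStep^[n] w := by
  induction n generalizing w with
  | zero => rfl
  | succ t ih =>
    simp only [count1dLoop]
    by_cases h : w.all (fun v => v == 0) = true
    · rw [if_pos h, iterate_all_zero w h]
    · rw [if_neg h, ih, Function.iterate_succ_apply]

-- the B-side 1-D counter equals the reference walk count
theorem count1d_eq_gWalk (L p rest : Int) :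
    count1d L p rest = gWalk L rest.toNat p := by
  unfold count1d
  by_cases hp : p < 0 ∨ L ≤ p
  · rw [if_pos hp, gWalk_oob _ _ _ hp]
  · rw [if_neg hp]
    have hn : (max rest 0) = ((rest.toNat : Int)) := by omega
    simp only [hn, Int.toNat_natCast, count1dLoop_eq_iterate]
    exact window_correct L p rest.toNat hp rest.toNat (le_refl _) p (by omega) (by omega) (by omega)

-- ===== VERDICT (by name: the statement is the Claim_ definition above) =====
theorem process_spec : Claim_equal_process := by
  intro M N x y rest _ _
  unfold Spec_process process process_alt
  rw [processA_factor]
  by_cases h : x < 0 ∨ M ≤ x ∨ y < 0 ∨ N ≤ y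
  · rw [if_pos h]
    rcases h with h | h | h | h
    · rw [gWalk_oob M _ x (Or.inl h), zero_mul]
    · rw [gWalk_oob M _ x (Or.inr h), zero_mul]
    · rw [gWalk_oob N _ y (Or.inl h), mul_zero]
    · rw [gWalk_oob N _ y (Or.inr h), mul_zero]
  · rw [if_neg h]
    simp only [count1d_eq_gWalk]
    by_cases hmn : M ≤ N
    · rw [if_pos hmn]
      by_cases hc : gWalk M rest.toNat x = 0
      · rw [if_pos hc, hc, zero_mul]
      · rw [if_neg hc]
    · rw [if_neg hmn]
      by_cases hc : gWalk N rest.toNat y = 0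
      · rw [if_pos hc, hc, mul_zero]
      · rw [if_neg hc]
        ring
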